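-- pv_equiv track=rewrite | github.com/cigdemahmet27/principle_of_cmp_comm_p1 | src/decoders.py | decode_nrzi
-- ===== SOURCE A (Python) =====
-- def decode_nrzi(signal):
--     """
--     NRZI Decoder:
--     Compare current voltage level with previous level.
--     Change -> '1'
--     No Change -> '0'
--     """
--     decoded_bits = ""
--     # The encoder assumed starting High (+1)
--     last_level = 1
--
--     for i in range(0, len(signal), 2):
--         current_level = signal[i]
--
--         # Check for transition
--         if current_level != last_level:
--             decoded_bits += "1"
--         else:
--             decoded_bits += "0"
--
--         last_level = current_level # Update for next bit
--
--     return decoded_bits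
-- ===== SOURCE B (Python) =====
-- def decode_nrzi(sig):
--     # Run-length decomposition: scan the sampled levels as maximal runs of equal
--     # values; each run emits one transition bit ('1' unless it equals the level
--     # before the run, seeded at 1) followed by zeros for the rest of the run.
--     levels = list(sig[::2])
--     n = len(levels)
--     out = []
--     prev = 1
--     i = 0
--     while i < n:
--         v = levels[i]
--         j = i + 1
--         while j < n and levels[j] == v:
--             j += 1
--         out.append(('0' if v == prev else '1') + '0' * (j - i - 1))
--         prev = v
--         i = j
--     return ''.join(out)
-- ===== Notes on version B (the rewrite author's own statement) =====
-- stated objective: alternative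
-- what changed: Replaces the per-sample last_level comparison loop with a run-length scan: the step-2 samples are consumed as maximal runs of equal values, each run emitting one transition bit followed by '0' repeated for the rest of the run.
import Mathlib
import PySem

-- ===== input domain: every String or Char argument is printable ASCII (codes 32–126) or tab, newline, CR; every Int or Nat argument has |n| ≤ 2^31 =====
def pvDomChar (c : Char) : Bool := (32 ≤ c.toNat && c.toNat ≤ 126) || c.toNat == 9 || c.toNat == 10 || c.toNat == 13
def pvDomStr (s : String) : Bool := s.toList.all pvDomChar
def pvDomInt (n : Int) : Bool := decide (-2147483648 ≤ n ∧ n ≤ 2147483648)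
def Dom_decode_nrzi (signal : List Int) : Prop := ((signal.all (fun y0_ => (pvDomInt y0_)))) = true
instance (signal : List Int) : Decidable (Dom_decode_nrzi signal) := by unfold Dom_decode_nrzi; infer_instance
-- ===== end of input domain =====

-- B replaces A's per-sample last_level loop with a run-length scan over the step-2
-- samples: each maximal run of equal levels emits one transition bit then zeros
-- (objective: alternative decomposition, same cost).


-- ===== PORT A =====
-- literal port of A: for i in range(0, len(signal), 2): current = signal[i]; append '1'/'0'; last = current
-- (signal[i] never raises here — i < len(signal) — so the total pyGetD with an unused default is exact)
def decode_nrzi (signal : List Int) : String :=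
  let r := (PySem.List.pyRange 0 (PySem.List.len signal) 2).foldl
    (fun (st : List Char × Int) i =>
      let current := PySem.List.pyGetD signal i 0
      (st.1 ++ [if current ≠ st.2 then '1' else '0'], current))
    ([], 1)
  String.ofList r.1

-- ===== PORT B =====
-- inner while loop of B: k counts the prefix of the remaining tail equal to v
def pvRunLen (v : Int) : List Int → Nat
  | [] => 0
  | x :: xs => if x == v then pvRunLen v xs + 1 else 0

-- outer while loop of B: peel one maximal run per step, emit its characters
def pvRunsGo (prev : Int) : List Int → List Char
  | [] => []
  | v :: xs =>
    let k := pvRunLen v xs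
    ((if v == prev then '0' else '1') :: List.replicate k '0') ++ pvRunsGo v (xs.drop k)
termination_by xs => xs.length
decreasing_by
  simp only [List.length_cons, List.length_drop]
  omega

-- literal port of B: rest = signal[::2]; run-length scan with prev seeded at 1
def decode_nrzi_alt (signal : List Int) : String :=
  String.ofList (pvRunsGo 1 ((PySem.List.slice? signal none none 2).getD []))

-- ===== PRECONDITION & SPEC =====
def Spec_decode_nrzi (signal : List Int) (out : String) : Prop := out = decode_nrzi_alt signal
instance (signal : List Int) (out : String) : Decidable (Spec_decode_nrzi signal out) := by unfold Spec_decode_nrzi; infer_instance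

-- ===== CLAIM (what is proved, stated in full; the proofs are below) =====
def Claim_equal_decode_nrzi : Prop := ∀ (signal : List Int), Dom_decode_nrzi signal → Spec_decode_nrzi signal (decode_nrzi signal)

-- ===== LEMMAS AND PROOFS =====

-- the elements Python samples at indices 0, 2, 4, …
def pvEveryOther : List Int → List Int
  | [] => []
  | [x] => [x]
  | x :: _ :: xs => x :: pvEveryOther xs

-- the decoded characters produced from a previous level and the remaining sampled levels
def pvPairChars : Int → List Int → List Char
  | _, [] => []
  | last, x :: r => (if x ≠ last then '1' else '0') :: pvPairChars x r

-- the loop count of 'range(0, n, 2)' (and of the step-2 slice) is ⌈n/2⌉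
theorem pvCnt (n : Nat) : (if (0:Int) < (n:Int) then (((n:Int) - 0 + 2 - 1)/2).toNat else 0) = (n+1)/2 := by
  split_ifs with h
  · omega
  · omega

theorem pvRange_two_eq (n : Nat) :
    PySem.List.pyRange 0 (n : Int) 2 = (List.range ((n + 1) / 2)).map (fun k : Nat => 2 * (k : Int)) := by
  rw [PySem.List.pyRange_of_pos 0 (n : Int) (by norm_num), pvCnt]
  simp only [zero_add]

theorem pvMap_eq_everyOther (xs : List Int) :
    (List.range ((xs.length + 1) / 2)).map (fun k => xs.getD (2 * k) 0) = pvEveryOther xs := by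
  induction xs using pvEveryOther.induct with
  | case1 => rfl
  | case2 x => simp [pvEveryOther]
  | case3 x y r ih =>
    have hlen : ((x :: y :: r).length + 1) / 2 = (r.length + 1) / 2 + 1 := by
      simp [List.length]; omega
    rw [hlen, List.range_succ_eq_map, List.map_cons, List.map_map]
    have h2 : ((fun k => (x :: y :: r).getD (2 * k) 0) ∘ Nat.succ) = (fun k => r.getD (2 * k) 0) := by
      funext k
      simp [Function.comp, show 2 * (k + 1) = 2 * k + 1 + 1 by omega, List.getD]
    rw [h2, ih]
    simp [pvEveryOther]

theorem pvFilterMap_eq_everyOther (xs : List Int) :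
    (List.range ((xs.length + 1) / 2)).filterMap (fun k => xs[2 * k]?) = pvEveryOther xs := by
  induction xs using pvEveryOther.induct with
  | case1 => rfl
  | case2 x => simp [pvEveryOther]
  | case3 x y r ih =>
    have hlen : ((x :: y :: r).length + 1) / 2 = (r.length + 1) / 2 + 1 := by
      simp [List.length]; omega
    rw [hlen, List.range_succ_eq_map, List.filterMap_cons, List.filterMap_map]
    have h2 : ((fun k => (x :: y :: r)[2 * k]?) ∘ Nat.succ) = (fun k => r[2 * k]?) := by
      funext k
      simp [Function.comp, show 2 * (k + 1) = 2 * k + 1 + 1 by omega]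
    simp only [Nat.mul_zero, List.getElem?_cons_zero, h2, ih]
    simp [pvEveryOther]

-- B's slice signal[::2] is exactly the sampled sequence
theorem pvSlice_eq_everyOther (xs : List Int) :
    (PySem.List.slice? xs none none 2).getD [] = pvEveryOther xs := by
  have hidx : PySem.List.sliceIndices xs.length none none 2 = (0, (xs.length : Int), 2) := by
    simp [PySem.List.sliceIndices]
  simp only [PySem.List.slice?, hidx]
  rw [if_neg (by norm_num), if_pos (by norm_num : (0:Int) < 2), Option.getD_some, pvCnt]
  have hf : (fun k : Nat => xs[((0:Int) + 2 * (k : Int)).toNat]?) = (fun k : Nat => xs[2 * k]?) := by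
    funext k; congr 1; omega
  rw [hf, pvFilterMap_eq_everyOther]

-- A's loop over the index list produces the pairwise characters of the sampled values
theorem pvA_loop (signal : List Int) (ks : List Nat) (acc : List Char) (last : Int) :
    (ks.foldl (fun (st : List Char × Int) (k : Nat) =>
        (st.1 ++ [if PySem.List.pyGetD signal (2 * (k : Int)) 0 ≠ st.2 then '1' else '0'],
          PySem.List.pyGetD signal (2 * (k : Int)) 0)) (acc, last)).1
      = acc ++ pvPairChars last (ks.map (fun k => signal.getD (2 * k) 0)) := by
  induction ks generalizing acc last with
  | nil => simp [pvPairChars]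
  | cons k r ih =>
    have hg : PySem.List.pyGetD signal (2 * (k : Int)) 0 = signal.getD (2 * k) 0 := by
      rw [show (2 * (k : Int)) = ((2 * k : Nat) : Int) by push_cast; ring,
        PySem.List.pyGetD_natCast]
    rw [List.foldl_cons]
    refine (ih _ _).trans ?_
    simp [pvPairChars, hg]

-- peeling a run: the pairwise chars after a value v start with '0' for each element equal to v
theorem pvPairChars_run (v : Int) (xs : List Int) :
    pvPairChars v xs = List.replicate (pvRunLen v xs) '0' ++ pvPairChars v (xs.drop (pvRunLen v xs)) := by
  induction xs with
  | nil => rfl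
  | cons x r ih =>
    by_cases h : x = v
    · subst h
      simp only [pvRunLen, beq_self_eq_true, if_pos, pvPairChars, ne_eq, not_true_eq_false, List.replicate_succ, List.drop_succ_cons]
      simp [ih]
    · simp [pvRunLen, h, pvPairChars]

-- B's run-length scan produces the same pairwise characters
theorem pvRunsGo_eq_pairChars (s : List Int) (prev : Int) :
    pvRunsGo prev s = pvPairChars prev s := by
  induction prev, s using pvRunsGo.induct with
  | case1 _ => simp [pvRunsGo, pvPairChars]
  | case2 p v xs k ih =>
    rw [pvRunsGo]
    show ((if v == p then '0' else '1') :: List.replicate (pvRunLen v xs) '0')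
        ++ pvRunsGo v (xs.drop (pvRunLen v xs)) = _
    rw [ih]
    rw [show pvPairChars p (v :: xs) = (if v ≠ p then '1' else '0') :: pvPairChars v xs from rfl,
      pvPairChars_run v xs]
    by_cases h : v = p
    · subst h
      simp
      rfl
    · simp [h]
      rfl

theorem decode_nrzi_eq (signal : List Int) :
    decode_nrzi signal = String.ofList (pvPairChars 1 (pvEveryOther signal)) := by
  unfold decode_nrzi
  rw [PySem.List.len_eq, pvRange_two_eq signal.length]
  simp only [List.foldl_map]
  rw [pvA_loop, pvMap_eq_everyOther, List.nil_append]

theorem decode_nrzi_alt_eq (signal : List Int) :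
    decode_nrzi_alt signal = String.ofList (pvPairChars 1 (pvEveryOther signal)) := by
  unfold decode_nrzi_alt
  rw [pvSlice_eq_everyOther, pvRunsGo_eq_pairChars]

-- ===== VERDICT (by name: the statement is the Claim_ definition above) =====
theorem decode_nrzi_spec : Claim_equal_decode_nrzi := by
  intro signal _
  unfold Spec_decode_nrzi
  rw [decode_nrzi_eq, decode_nrzi_alt_eq]
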